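-- pv_equiv track=rewrite | github.com/DavisM1212/NHTSA-ODI-Complaint-Analytics | src/modeling/common/helpers.py | classify_feature_columns
-- ===== SOURCE A (Python) =====
-- CAT_FEATURES = [
--     'mfr_name',
--     'maketxt',
--     'modeltxt',
--     'state',
--     'state_region',
--     'cmpl_type',
--     'drive_train',
--     'fuel_sys',
--     'fuel_type',
--     'trans_type',
--     'fire',
--     'crash',
--     'medical_attn',
--     'vehicles_towed_yn',
--     'police_rpt_yn',
--     'repaired_yn',
--     'vehicle_age_bucket'
-- ]
--
-- NUM_FEATURES = [
--     'yeartxt',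
--     'miles',
--     'veh_speed',
--     'injured',
--     'lag_days_safe',
--     'complaint_year',
--     'complaint_month',
--     'complaint_quarter',
--     'vehicle_age_years',
--     'prior_cmpl_mfr_all',
--     'prior_cmpl_make_model_all',
--     'prior_cmpl_make_model_year_all',
--     'prior_severity_share_mfr_all',
--     'prior_severity_share_make_model_all',
--     'prior_severity_share_make_model_year_all'
-- ]
--
-- FLAG_FEATURES = [
--     'miles_missing_flag',
--     'veh_speed_missing_flag',
--     'miles_zero_flag',
--     'veh_speed_zero_flag',
--     'faildate_trusted_flag',
--     'flag_date_order_bad',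
--     'flag_fail_pre_model',
--     'flag_fail_pre_model_far',
--     'severity_primary_flag',
--     'severity_broad_flag',
--     'flag_year_out_of_range'
-- ]
--
-- def dedupe_feature_cols(feature_cols):
--     seen = set()
--     ordered = []
--     for column in feature_cols:
--         if column in seen:
--             continue
--         seen.add(column)
--         ordered.append(column)
--     return ordered
--
-- def classify_feature_columns(feature_cols):
--     feature_cols = dedupe_feature_cols(feature_cols)
--     cat_cols = [column for column in feature_cols if column in CAT_FEATURES]
--     num_cols = [column for column in feature_cols if column in NUM_FEATURES]
--     flag_cols = [column for column in feature_cols if column in FLAG_FEATURES]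
--     return {
--         'feature_cols': feature_cols,
--         'cat_cols': cat_cols,
--         'num_cols': num_cols,
--         'flag_cols': flag_cols
--     }
-- ===== SOURCE B (Python) =====
-- CAT_FEATURES = [
--     'mfr_name', 'maketxt', 'modeltxt', 'state', 'state_region', 'cmpl_type',
--     'drive_train', 'fuel_sys', 'fuel_type', 'trans_type', 'fire', 'crash',
--     'medical_attn', 'vehicles_towed_yn', 'police_rpt_yn', 'repaired_yn',
--     'vehicle_age_bucket'
-- ]
--
-- NUM_FEATURES = [
--     'yeartxt', 'miles', 'veh_speed', 'injured', 'lag_days_safe',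
--     'complaint_year', 'complaint_month', 'complaint_quarter',
--     'vehicle_age_years', 'prior_cmpl_mfr_all', 'prior_cmpl_make_model_all',
--     'prior_cmpl_make_model_year_all', 'prior_severity_share_mfr_all',
--     'prior_severity_share_make_model_all',
--     'prior_severity_share_make_model_year_all'
-- ]
--
-- FLAG_FEATURES = [
--     'miles_missing_flag', 'veh_speed_missing_flag', 'miles_zero_flag',
--     'veh_speed_zero_flag', 'faildate_trusted_flag', 'flag_date_order_bad',
--     'flag_fail_pre_model', 'flag_fail_pre_model_far', 'severity_primary_flag',
--     'severity_broad_flag', 'flag_year_out_of_range'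
-- ]
--
-- def classify_feature_columns(feature_cols):
--     # single pass: dedupe and bucket each column as it is first seen
--     seen = set()
--     ordered = []
--     cat_cols = []
--     num_cols = []
--     flag_cols = []
--     for column in feature_cols:
--         if column in seen:
--             continue
--         seen.add(column)
--         ordered.append(column)
--         if column in CAT_FEATURES:
--             cat_cols.append(column)
--         if column in NUM_FEATURES:
--             num_cols.append(column)
--         if column in FLAG_FEATURES:
--             flag_cols.append(column)
--     return {
--         'feature_cols': ordered,
--         'cat_cols': cat_cols,
--         'num_cols': num_cols,
--         'flag_cols': flag_cols
--     }
-- ===== Notes on version B (the rewrite author's own statement) =====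
-- stated objective: simpler
-- what changed: Replaces the dedupe pass followed by three separate filtering comprehensions (four traversals of the column list) with a single loop that dedupes and appends each new column to every matching bucket in one pass.
import Mathlib
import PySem

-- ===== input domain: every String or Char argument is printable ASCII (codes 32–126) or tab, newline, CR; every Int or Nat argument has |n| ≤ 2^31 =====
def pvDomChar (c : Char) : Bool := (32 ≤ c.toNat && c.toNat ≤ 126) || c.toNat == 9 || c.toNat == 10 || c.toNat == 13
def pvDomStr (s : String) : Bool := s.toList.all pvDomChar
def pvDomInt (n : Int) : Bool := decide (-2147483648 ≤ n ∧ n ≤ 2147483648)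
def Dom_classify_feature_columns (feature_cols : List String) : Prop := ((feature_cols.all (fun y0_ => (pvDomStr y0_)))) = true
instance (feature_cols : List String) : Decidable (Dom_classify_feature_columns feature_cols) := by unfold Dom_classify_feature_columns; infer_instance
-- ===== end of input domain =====

-- B dedupes and buckets each column in a single loop instead of A's dedupe pass
-- followed by three separate filtering comprehensions (objective: simpler, one pass).

-- ===== PORT A =====
def CAT_FEATURES : List String :=
  ["mfr_name", "maketxt", "modeltxt", "state", "state_region", "cmpl_type",
   "drive_train", "fuel_sys", "fuel_type", "trans_type", "fire", "crash",
   "medical_attn", "vehicles_towed_yn", "police_rpt_yn", "repaired_yn",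
   "vehicle_age_bucket"]

def NUM_FEATURES : List String :=
  ["yeartxt", "miles", "veh_speed", "injured", "lag_days_safe",
   "complaint_year", "complaint_month", "complaint_quarter",
   "vehicle_age_years", "prior_cmpl_mfr_all", "prior_cmpl_make_model_all",
   "prior_cmpl_make_model_year_all", "prior_severity_share_mfr_all",
   "prior_severity_share_make_model_all",
   "prior_severity_share_make_model_year_all"]

def FLAG_FEATURES : List String :=
  ["miles_missing_flag", "veh_speed_missing_flag", "miles_zero_flag",
   "veh_speed_zero_flag", "faildate_trusted_flag", "flag_date_order_bad",
   "flag_fail_pre_model", "flag_fail_pre_model_far", "severity_primary_flag",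
   "severity_broad_flag", "flag_year_out_of_range"]

-- A's dedupe loop: 'seen' is a Python set, 'ordered' grows by append
def dedupe_feature_cols (feature_cols : List String) : List String :=
  (feature_cols.foldl
    (fun (st : PySem.Set String × List String) column =>
      if PySem.Set.contains st.1 column then st
      else (PySem.Set.add st.1 column, st.2 ++ [column]))
    ((PySem.Set.empty : PySem.Set String), ([] : List String))).2

def classify_feature_columns (feature_cols : List String) : List (String × List String) :=
  let fc := dedupe_feature_cols feature_cols
  let cat_cols := fc.filter (fun column => CAT_FEATURES.contains column)
  let num_cols := fc.filter (fun column => NUM_FEATURES.contains column)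
  let flag_cols := fc.filter (fun column => FLAG_FEATURES.contains column)
  [("feature_cols", fc), ("cat_cols", cat_cols), ("num_cols", num_cols), ("flag_cols", flag_cols)]

-- ===== PORT B =====
-- single pass: state = (seen, ordered, cat_cols, num_cols, flag_cols)
def pvBStep (st : PySem.Set String × List String × List String × List String × List String)
    (column : String) :
    PySem.Set String × List String × List String × List String × List String :=
  if PySem.Set.contains st.1 column then st
  else
    (PySem.Set.add st.1 column,
     st.2.1 ++ [column],
     if CAT_FEATURES.contains column then st.2.2.1 ++ [column] else st.2.2.1,
     if NUM_FEATURES.contains column then st.2.2.2.1 ++ [column] else st.2.2.2.1,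
     if FLAG_FEATURES.contains column then st.2.2.2.2 ++ [column] else st.2.2.2.2)

def classify_feature_columns_alt (feature_cols : List String) : List (String × List String) :=
  let st := feature_cols.foldl pvBStep ((PySem.Set.empty : PySem.Set String), [], [], [], [])
  [("feature_cols", st.2.1), ("cat_cols", st.2.2.1), ("num_cols", st.2.2.2.1), ("flag_cols", st.2.2.2.2)]

-- ===== PRECONDITION & SPEC =====
def Spec_classify_feature_columns (feature_cols : List String) (out : List (String × List String)) : Prop := out = classify_feature_columns_alt feature_cols
instance (feature_cols : List String) (out : List (String × List String)) : Decidable (Spec_classify_feature_columns feature_cols out) := by unfold Spec_classify_feature_columns; infer_instance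

-- ===== CLAIM (what is proved, stated in full; the proofs are below) =====
def Claim_equal_classify_feature_columns : Prop := ∀ (feature_cols : List String), Dom_classify_feature_columns feature_cols → Spec_classify_feature_columns feature_cols (classify_feature_columns feature_cols)

-- ===== LEMMAS AND PROOFS =====

-- the elements a dedupe pass starting from 'seen = s' appends (first occurrences not in s)
def pvNew (s : PySem.Set String) : List String → List String
  | [] => []
  | x :: xs => if PySem.Set.contains s x then pvNew s xs else x :: pvNew (PySem.Set.add s x) xs

-- the final 'seen' set of that pass
def pvSeen (s : PySem.Set String) : List String → PySem.Set String
  | [] => s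
  | x :: xs => if PySem.Set.contains s x then pvSeen s xs else pvSeen (PySem.Set.add s x) xs

theorem pvAfold (xs : List String) : ∀ (s : PySem.Set String) (o : List String),
    xs.foldl
      (fun (st : PySem.Set String × List String) column =>
        if PySem.Set.contains st.1 column then st
        else (PySem.Set.add st.1 column, st.2 ++ [column])) (s, o)
      = (pvSeen s xs, o ++ pvNew s xs) := by
  induction xs with
  | nil => intro s o; simp [pvSeen, pvNew]
  | cons x xs ih =>
    intro s o
    rw [List.foldl_cons]
    by_cases h : x ∈ s
    · rw [if_pos (show PySem.Set.contains s x = true by simp [h]), ih]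
      simp [pvSeen, pvNew, h]
    · rw [if_neg (show ¬ PySem.Set.contains s x = true by simp [h]), ih]
      simp [pvSeen, pvNew, h]

theorem pvBfold (xs : List String) :
    ∀ (s : PySem.Set String) (o c n f : List String),
    xs.foldl pvBStep (s, o, c, n, f)
      = (pvSeen s xs, o ++ pvNew s xs,
         c ++ (pvNew s xs).filter (fun column => CAT_FEATURES.contains column),
         n ++ (pvNew s xs).filter (fun column => NUM_FEATURES.contains column),
         f ++ (pvNew s xs).filter (fun column => FLAG_FEATURES.contains column)) := by
  induction xs with
  | nil => intro s o c n f; simp [pvSeen, pvNew]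
  | cons x xs ih =>
    intro s o c n f
    rw [List.foldl_cons]
    by_cases h : x ∈ s
    · rw [show pvBStep (s, o, c, n, f) x = (s, o, c, n, f) from by
        simp [pvBStep, h], ih]
      simp [pvSeen, pvNew, h]
    · rw [show pvBStep (s, o, c, n, f) x
          = (PySem.Set.add s x, o ++ [x],
             if CAT_FEATURES.contains x then c ++ [x] else c,
             if NUM_FEATURES.contains x then n ++ [x] else n,
             if FLAG_FEATURES.contains x then f ++ [x] else f) from by
        simp [pvBStep, h], ih]
      by_cases hc : x ∈ CAT_FEATURES <;>
      by_cases hn : x ∈ NUM_FEATURES <;>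
      by_cases hf : x ∈ FLAG_FEATURES <;>
      simp [pvSeen, pvNew, h, hc, hn, hf]

-- ===== VERDICT (by name: the statement is the Claim_ definition above) =====
theorem classify_feature_columns_spec : Claim_equal_classify_feature_columns := by
  intro feature_cols _
  unfold Spec_classify_feature_columns classify_feature_columns classify_feature_columns_alt dedupe_feature_cols
  rw [pvAfold, pvBfold]
  simp
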